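-- pv_equiv track=rewrite | github.com/leonelluiscorado/GEDICorrect | src/data_process.py | clean_cols_rh
-- ===== SOURCE A (Python) =====
-- def clean_cols_rh(columns, original=False):
--     """
--     Helper function to parse Relative Height Metrics columns from a dataframe.
--     Keeps the selected **rh_col_types** columns.
--
--     Original files keep the names like 'rh98' and not original files keep like 'rh_98'.
--
--     Args:
--         columns (list): A list of column names of a DataFrame.
--         original (bool): Flag that changes the 'RH' variable column names.
--
--     Returns:
--         list: A list of clean named columns.
--     """
--     rh_col_types = [f'{i}' for i in range(25, 105, 5)]
--     rh_cols = [col for col in columns if 'rh' in col]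
--
--     rh_final_cols = []
--     for col in rh_cols:
--
--         # Check only rh number
--         if original:
--             col_to_check = col.split("rh")[-1]
--         else:
--             col_to_check = col.split("_")[-1]
--
--         # If rh number equal to any on the rh_col_types, add to final rh_col
--         if any(col_to_check == rh_col_type for rh_col_type in rh_col_types):
--             rh_final_cols.append(col)
--
--     # Exclude original 'rh' columns to include in final value
--     columns = [x for x in columns if x not in rh_cols]
--
--     return columns + rh_final_cols
-- ===== SOURCE B (Python) =====
-- def clean_cols_rh(columns, original=False):
--     valid = {str(i) for i in range(25, 105, 5)}
--
--     def rank(col):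
--         if 'rh' not in col:
--             return 0
--         num = col.split('rh')[-1] if original else col.split('_')[-1]
--         return 1 if num in valid else 2
--
--     return sorted((col for col in columns if rank(col) != 2), key=rank)
-- ===== Notes on version B (the rewrite author's own statement) =====
-- stated objective: alternative
-- what changed: Replaces A's partition passes (collect rh columns, filter them into rh_final_cols, re-filter columns by list membership, concatenate) with a rank function (0 = non-rh, 1 = valid rh, 2 = invalid rh) and one stable sort by rank of the kept columns; stability makes the sort reproduce A's order.
import Mathlib
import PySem

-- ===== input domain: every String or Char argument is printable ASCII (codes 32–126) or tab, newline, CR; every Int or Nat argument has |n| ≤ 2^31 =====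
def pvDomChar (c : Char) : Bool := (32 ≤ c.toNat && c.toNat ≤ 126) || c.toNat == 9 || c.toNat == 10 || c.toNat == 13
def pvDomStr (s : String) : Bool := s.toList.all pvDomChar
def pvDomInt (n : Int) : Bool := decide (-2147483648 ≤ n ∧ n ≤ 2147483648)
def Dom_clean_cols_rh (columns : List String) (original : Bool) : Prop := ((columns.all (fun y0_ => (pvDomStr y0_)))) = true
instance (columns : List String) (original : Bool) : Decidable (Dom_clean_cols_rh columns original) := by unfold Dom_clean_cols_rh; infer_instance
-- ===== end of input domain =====

-- B replaces A's partition-and-concatenate passes with a rank function (0 = non-rh,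
-- 1 = valid rh, 2 = invalid rh) and a single stable sort by rank of the kept columns;
-- objective: an alternative, sort-based mechanism of similar cost.

-- ===== PORT A =====
-- 'col.split(sep)[-1]': split? is none only for sep = "" (never here), and split never
-- returns [], so getD [] / getLastD "" are exact.
def clean_cols_rh (columns : List String) (original : Bool) : List String :=
  let rh_col_types := (PySem.List.pyRange 25 105 5).map PySem.Int.toStr
  let rh_cols := columns.filter (fun col => PySem.Str.isIn "rh" col)
  let rh_final_cols := rh_cols.foldl (fun acc col =>
    let col_to_check :=
      if original then ((PySem.Str.split? col "rh").getD []).getLastD ""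
      else ((PySem.Str.split? col "_").getD []).getLastD ""
    if rh_col_types.any (fun rh_col_type => col_to_check == rh_col_type) then acc ++ [col]
    else acc) []
  let columns' := columns.filter (fun x => !(rh_cols.contains x))
  columns' ++ rh_final_cols

-- ===== PORT B =====
def clean_cols_rh_alt_rank (valid : List String) (original : Bool) (col : String) : Int :=
  if !(PySem.Str.isIn "rh" col) then 0
  else
    let num :=
      if original then ((PySem.Str.split? col "rh").getD []).getLastD ""
      else ((PySem.Str.split? col "_").getD []).getLastD ""
    if valid.contains num then 1 else 2

def clean_cols_rh_alt (columns : List String) (original : Bool) : List String :=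
  let valid := PySem.Set.ofList ((PySem.List.pyRange 25 105 5).map PySem.Int.toStr)
  PySem.List.sorted (columns.filter (fun col => clean_cols_rh_alt_rank valid original col != 2))
    (clean_cols_rh_alt_rank valid original)

-- ===== PRECONDITION & SPEC =====
def Spec_clean_cols_rh (columns : List String) (original : Bool) (out : List String) : Prop := out = clean_cols_rh_alt columns original
instance (columns : List String) (original : Bool) (out : List String) : Decidable (Spec_clean_cols_rh columns original out) := by unfold Spec_clean_cols_rh; infer_instance

-- ===== CLAIM (what is proved, stated in full; the proofs are below) =====
def Claim_equal_clean_cols_rh : Prop := ∀ (columns : List String) (original : Bool), Dom_clean_cols_rh columns original → Spec_clean_cols_rh columns original (clean_cols_rh columns original)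

-- ===== LEMMAS AND PROOFS =====

-- named per-column data and loop bodies (definitionally equal to the ports' lambdas; proofs only)
def pvNum (original : Bool) (col : String) : String :=
  if original then ((PySem.Str.split? col "rh").getD []).getLastD ""
  else ((PySem.Str.split? col "_").getD []).getLastD ""

def pvTypes : List String := (PySem.List.pyRange 25 105 5).map PySem.Int.toStr

def pvP (col : String) : Bool := PySem.Str.isIn "rh" col

def pvQ (original : Bool) (col : String) : Bool :=
  pvTypes.any (fun t => pvNum original col == t)

def pvStepA (original : Bool) (acc : List String) (col : String) : List String :=
  if pvTypes.any (fun rh_col_type => pvNum original col == rh_col_type) then acc ++ [col] else acc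

-- B's set-membership test agrees with a linear scan over the same list
lemma pv_valid_eq (x : String) :
    (PySem.Set.ofList pvTypes).contains x = pvTypes.any (fun t => x == t) := by
  rw [Bool.eq_iff_iff]
  simp only [PySem.Set.contains, List.contains_iff_mem, PySem.Set.mem_ofList, List.any_eq_true, beq_iff_eq]
  constructor
  · intro h; exact ⟨x, h, rfl⟩
  · rintro ⟨t, ht, rfl⟩; exact ht

-- B's rank function, characterised by A's two per-column tests
lemma pv_rank_eq (original : Bool) (col : String) :
    clean_cols_rh_alt_rank (PySem.Set.ofList pvTypes) original col
      = if pvP col then (if pvQ original col then 1 else 2) else 0 := by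
  show (if !(PySem.Str.isIn "rh" col) then 0
      else if (PySem.Set.ofList pvTypes).contains (pvNum original col) then 1 else 2)
    = if pvP col then (if pvQ original col then 1 else 2) else 0
  rw [pv_valid_eq]
  cases h : PySem.Str.isIn "rh" col <;> simp [PySem.Str.isIn] at h <;>
    simp [pvP, pvQ, PySem.Str.isIn, h]

-- A's inner loop is a filter by the valid-number test
lemma pv_a_fold (original : Bool) (l : List String) :
    l.foldl (pvStepA original) [] = l.filter (fun c => pvQ original c) := by
  have := PySem.List.foldl_append_if (fun col => pvQ original col) (fun c => c) l []
  simp only [List.nil_append, List.map_id'] at this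
  have hfun : pvStepA original = fun acc col => if pvQ original col then acc ++ [col] else acc := by
    funext acc col; rw [pvStepA, pvQ]
  rw [hfun]; exact this

-- 'x not in rh_cols' equals 'rh not in x' for x drawn from columns
lemma pv_notin_filter (columns : List String) :
    columns.filter (fun x => !((columns.filter (fun col => PySem.Str.isIn "rh" col)).contains x))
      = columns.filter (fun c => !pvP c) := by
  apply List.filter_congr
  intro x hx
  simp [List.contains_eq_mem, List.mem_filter, hx, pvP]

-- inserting before the first element the 'before' test accepts, at a named boundary
lemma pv_insertBy_boundary {α : Type} (before : α → α → Bool) (x : α) (as bs : List α)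
    (h0 : ∀ y ∈ as, before x y = false)
    (h1 : ∀ hne : bs ≠ [], before x (bs.head hne) = true) :
    PySem.List.insertBy before x (as ++ bs) = as ++ x :: bs := by
  induction as with
  | nil =>
    cases bs with
    | nil => rfl
    | cons b t =>
        have hb : before x b = true := h1 (by simp)
        simp [PySem.List.insertBy, hb]
  | cons a t ih =>
    have ha : before x a = false := h0 a (by simp)
    simp only [List.cons_append, PySem.List.insertBy, ha, Bool.false_eq_true, if_false]
    rw [ih (fun y hy => h0 y (by simp [hy]))]

-- the insertion-sort fold over rank-0/1 elements keeps the two classes in input order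
lemma pv_sort_fold (rank : String → Int) (l a b : List String)
    (hl : ∀ c ∈ l, rank c = 0 ∨ rank c = 1)
    (ha : ∀ y ∈ a, rank y = 0) (hb : ∀ y ∈ b, rank y = 1) :
    l.foldl (fun acc x => PySem.List.insertBy (fun u v => decide (rank u < rank v)) x acc) (a ++ b)
      = (a ++ l.filter (fun c => rank c == 0)) ++ (b ++ l.filter (fun c => rank c == 1)) := by
  induction l generalizing a b with
  | nil => simp
  | cons x t ih =>
    rw [List.foldl_cons, List.filter_cons, List.filter_cons]
    rcases hl x (by simp) with hx | hx
    · have hins : PySem.List.insertBy (fun u v => decide (rank u < rank v)) x (a ++ b)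
          = (a ++ [x]) ++ b := by
        rw [pv_insertBy_boundary _ _ a b
          (fun y hy => by simp [hx, ha y hy])
          (fun hne => by simp [hx, hb _ (List.head_mem hne)])]
        simp
      rw [hins, ih (a ++ [x]) b (fun c hc => hl c (List.mem_cons_of_mem _ hc))
        (fun y hy => by rcases List.mem_append.mp hy with h | h
                        · exact ha y h
                        · simp at h; simpa [h] using hx) hb]
      simp [hx]
    · have hins : PySem.List.insertBy (fun u v => decide (rank u < rank v)) x (a ++ b)
          = a ++ (b ++ [x]) := by
        rw [PySem.List.insertBy_of_forall_not_before _ _ _ (fun y hy => by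
          rcases List.mem_append.mp hy with h | h
          · simp [hx, ha y h]
          · simp [hx, hb y h])]
        simp
      rw [hins, ih a (b ++ [x]) (fun c hc => hl c (List.mem_cons_of_mem _ hc)) ha
        (fun y hy => by rcases List.mem_append.mp hy with h | h
                        · exact hb y h
                        · simp at h; simpa [h] using hx)]
      simp [hx]

-- ===== VERDICT (by name: the statement is the Claim_ definition above) =====
theorem clean_cols_rh_spec : Claim_equal_clean_cols_rh := by
  intro columns original _
  show clean_cols_rh columns original = clean_cols_rh_alt columns original
  have eA : clean_cols_rh columns original =
      columns.filter (fun x => !((columns.filter (fun col => PySem.Str.isIn "rh" col)).contains x))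
        ++ (columns.filter (fun col => PySem.Str.isIn "rh" col)).foldl (pvStepA original) [] := rfl
  set rank := clean_cols_rh_alt_rank (PySem.Set.ofList pvTypes) original with hrank
  have eB : clean_cols_rh_alt columns original =
      PySem.List.sorted (columns.filter (fun col => rank col != 2)) rank := rfl
  have hval : ∀ c ∈ columns.filter (fun col => rank col != 2), rank c = 0 ∨ rank c = 1 := by
    intro c hc
    have h2 : rank c ≠ 2 := by simpa using (List.mem_filter.mp hc).2
    rw [hrank, pv_rank_eq] at h2 ⊢
    split_ifs at h2 ⊢ <;> simp_all
  have hsort : (columns.filter (fun col => rank col != 2)).foldl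
      (fun acc x => PySem.List.insertBy (fun u v => decide (rank u < rank v)) x acc) []
      = (columns.filter (fun col => rank col != 2)).filter (fun c => rank c == 0)
        ++ (columns.filter (fun col => rank col != 2)).filter (fun c => rank c == 1) := by
    simpa using pv_sort_fold rank _ [] [] hval (by simp) (by simp)
  rw [eA, eB, PySem.List.sorted_eq_foldl_insertBy, hsort, pv_a_fold, pv_notin_filter]
  congr 1
  · rw [List.filter_filter]
    refine List.filter_congr (fun c _ => ?_)
    rw [hrank, pv_rank_eq]
    cases hp : pvP c
    · simp
    · cases hq : pvQ original c <;> simp_all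
  · rw [List.filter_filter, List.filter_filter]
    refine List.filter_congr (fun c _ => ?_)
    rw [hrank, pv_rank_eq]
    cases hp : pvP c
    · simp [pvP] at hp; simp [hp]
    · simp [pvP] at hp
      cases hq : pvQ original c <;> simp_all
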